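-- pv_equiv track=rewrite | github.com/davide1729/contest23 | fantacoso/solutions/not_to_run/chiara.py | select_team
-- ===== SOURCE A (Python) =====
-- from itertools import combinations
--
-- def select_team(candidates, N, E, B):
--     maxP = 0
--
--     for team in combinations(candidates,N):
--         sumMALE = 0
--         sumP = 0
--         sumE = 0
--         for c in team:
--             sumE += c[1]
--             if c[2] == 1:
--                 sumMALE +=1
--             sumP += c[0]
--         # checks
--         if sumE <= E:
--             continue
--         if sumMALE <= B:
--             continue
--
--         # team is legit
--         if sumP > maxP:
--             maxP = sumP
--
--     return maxP
-- ===== SOURCE B (Python) =====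
-- def select_team(candidates, N, E, B):
--     # DP over (selected count, capped male count, exact experience sum) -> best points,
--     # instead of enumerating every size-N team.
--     if N <= 0 or N > len(candidates):
--         return 0  # no team of size N (or only the empty team, which never scores)
--     mcap = B + 1 if B + 1 > 0 else 0
--     states = {(0, 0, 0): 0}
--     for c in candidates:
--         p, e, g = c[0], c[1], c[2]
--         new = dict(states)
--         for (cnt, m, ex), pts in states.items():
--             if cnt == N:
--                 continue
--             key = (cnt + 1, min(m + (1 if g == 1 else 0), mcap), ex + e)
--             if key not in new or new[key] < pts + p:
--                 new[key] = pts + p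
--         states = new
--     best = 0
--     for (cnt, m, ex), pts in states.items():
--         if cnt == N and m == mcap and ex > E and pts > best:
--             best = pts
--     return best
-- ===== Notes on version B (the rewrite author's own statement) =====
-- stated objective: alternative
-- what changed: Replaces A's enumeration of all C(M,N) size-N teams (itertools.combinations) by a dynamic program over dict states (selected count, male count capped at B+1, exact experience sum) -> best point total, read out at count N.
import Mathlib
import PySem

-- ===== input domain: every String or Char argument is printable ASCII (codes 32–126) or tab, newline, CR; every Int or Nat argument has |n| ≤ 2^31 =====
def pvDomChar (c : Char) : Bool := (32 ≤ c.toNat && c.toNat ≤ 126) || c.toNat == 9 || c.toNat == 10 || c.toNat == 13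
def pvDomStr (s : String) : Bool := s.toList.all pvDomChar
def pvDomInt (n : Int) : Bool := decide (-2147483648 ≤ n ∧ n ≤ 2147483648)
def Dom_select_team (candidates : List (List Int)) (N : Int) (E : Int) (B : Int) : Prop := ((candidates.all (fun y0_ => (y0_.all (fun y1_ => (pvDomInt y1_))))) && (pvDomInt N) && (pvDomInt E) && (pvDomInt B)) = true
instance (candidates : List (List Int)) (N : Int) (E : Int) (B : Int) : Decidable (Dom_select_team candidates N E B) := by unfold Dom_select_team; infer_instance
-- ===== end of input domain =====

-- B replaces A's enumeration of all C(M,N) teams by a dynamic program over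
-- (selected count, capped male count, experience sum) -> best points.

-- ===== PORT A =====
-- itertools.combinations(xs, k), in itertools order
def pvComb : Nat → List (List Int) → List (List (List Int))
  | 0, _ => [[]]
  | _+1, [] => []
  | k+1, x :: xs => ((pvComb k xs).map (fun t => x :: t)) ++ pvComb (k+1) xs

-- indexing c[0],c[1],c[2] is ported as (pyGet? c i).getD 0, exact on Pre_ (rows of length ≥ 3);
-- N.toNat is exact on Pre_ (0 ≤ N; Python's combinations raises ValueError for N < 0)
def select_team (candidates : List (List Int)) (N : Int) (E : Int) (B : Int) : Int :=
  (pvComb N.toNat candidates).foldl (fun maxP team =>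
    let s := team.foldl (fun (acc : Int × Int × Int) c =>
      (acc.1 + (PySem.List.pyGet? c 1).getD 0,
       acc.2.1 + (if ((PySem.List.pyGet? c 2).getD 0) == 1 then 1 else 0),
       acc.2.2 + (PySem.List.pyGet? c 0).getD 0)) ((0:Int), (0:Int), (0:Int))
    if s.1 ≤ E then maxP
    else if s.2.1 ≤ B then maxP
    else if s.2.2 > maxP then s.2.2 else maxP) 0

-- ===== PORT B =====
def select_team_alt (candidates : List (List Int)) (N : Int) (E : Int) (B : Int) : Int :=
  if N ≤ 0 ∨ (candidates.length : Int) < N then 0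
  else
  let mcap : Int := if B + 1 > 0 then B + 1 else 0
  let states := candidates.foldl (fun states c =>
    let p := (PySem.List.pyGet? c 0).getD 0
    let e := (PySem.List.pyGet? c 1).getD 0
    let g := (PySem.List.pyGet? c 2).getD 0
    states.items.foldl (fun new kp =>
      if kp.1.1 == N then new
      else
        let key' : Int × Int × Int :=
          (kp.1.1 + 1, min (kp.1.2.1 + (if g == 1 then 1 else 0)) mcap, kp.1.2.2 + e)
        match new.get? key' with
        | none => new.insert key' (kp.2 + p)
        | some v => if v < kp.2 + p then new.insert key' (kp.2 + p) else new) states)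
    ((PySem.Dict.empty : PySem.Dict (Int × Int × Int) Int).insert (0, 0, 0) 0)
  states.items.foldl (fun best kp =>
    if kp.1.1 == N && kp.1.2.1 == mcap && decide (E < kp.1.2.2) && decide (best < kp.2)
    then kp.2 else best) 0

-- ===== PRECONDITION & SPEC =====
-- Pre_ excludes exactly the inputs on which the Python A raises: negative N
-- (combinations raises ValueError) and candidate rows shorter than 3 whenever
-- 1 ≤ N ≤ len(candidates), where indexing some row raises IndexError.
def Pre_select_team (candidates : List (List Int)) (N : Int) (E : Int) (B : Int) : Prop :=
  0 ≤ N ∧ (N = 0 ∨ (candidates.length : Int) < N ∨ ∀ c ∈ candidates, 3 ≤ c.length)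
instance (candidates : List (List Int)) (N : Int) (E : Int) (B : Int) : Decidable (Pre_select_team candidates N E B) := by unfold Pre_select_team; infer_instance

def pvWitness_select_team : List (List Int) × Int × Int × Int := ([[5, 2, 1], [3, 4, 0]], 1, 1, 0)

def Spec_select_team (candidates : List (List Int)) (N : Int) (E : Int) (B : Int) (out : Int) : Prop := out = select_team_alt candidates N E B
instance (candidates : List (List Int)) (N : Int) (E : Int) (B : Int) (out : Int) : Decidable (Spec_select_team candidates N E B out) := by unfold Spec_select_team; infer_instance

-- ===== CLAIM (what is proved, stated in full; the proofs are below) =====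
def Claim_equal_select_team : Prop := ∀ (candidates : List (List Int)) (N : Int) (E : Int) (B : Int), Dom_select_team candidates N E B → Pre_select_team candidates N E B → Spec_select_team candidates N E B (select_team candidates N E B)

-- ===== LEMMAS AND PROOFS =====

-- row accessors and team sums (proof-only helpers)
def rowP (c : List Int) : Int := (PySem.List.pyGet? c 0).getD 0
def rowE (c : List Int) : Int := (PySem.List.pyGet? c 1).getD 0
def rowG (c : List Int) : Int := (PySem.List.pyGet? c 2).getD 0
def sE (S : List (List Int)) : Int := (S.map rowE).sum
def sM (S : List (List Int)) : Int := (S.map (fun c => if rowG c == 1 then (1:Int) else 0)).sum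
def sP (S : List (List Int)) : Int := (S.map rowP).sum

def statsK (mcap : Int) (S : List (List Int)) : Int × Int × Int :=
  ((S.length : Int), min (sM S) mcap, sE S)

def bumpK (mcap e g : Int) (k : Int × Int × Int) : Int × Int × Int :=
  (k.1 + 1, min (k.2.1 + (if g == 1 then 1 else 0)) mcap, k.2.2 + e)

def mcapOf (B : Int) : Int := if B + 1 > 0 then B + 1 else 0

-- the three folds as named functions (definitionally the ports' lambdas)
def stepA (E B : Int) (maxP : Int) (team : List (List Int)) : Int :=
  let s := team.foldl (fun (acc : Int × Int × Int) c =>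
    (acc.1 + (PySem.List.pyGet? c 1).getD 0,
     acc.2.1 + (if ((PySem.List.pyGet? c 2).getD 0) == 1 then 1 else 0),
     acc.2.2 + (PySem.List.pyGet? c 0).getD 0)) ((0:Int), (0:Int), (0:Int))
  if s.1 ≤ E then maxP
  else if s.2.1 ≤ B then maxP
  else if s.2.2 > maxP then s.2.2 else maxP

def innerF (N mcap p e g : Int) (new : PySem.Dict (Int × Int × Int) Int)
    (kp : (Int × Int × Int) × Int) : PySem.Dict (Int × Int × Int) Int :=
  if kp.1.1 == N then new
  else
    match new.get? (bumpK mcap e g kp.1) with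
    | none => new.insert (bumpK mcap e g kp.1) (kp.2 + p)
    | some v => if v < kp.2 + p then new.insert (bumpK mcap e g kp.1) (kp.2 + p) else new

def outerF (N mcap : Int) (states : PySem.Dict (Int × Int × Int) Int) (c : List Int) :
    PySem.Dict (Int × Int × Int) Int :=
  states.items.foldl (innerF N mcap (rowP c) (rowE c) (rowG c)) states

def readoutF (N mcap E : Int) (best : Int) (kp : (Int × Int × Int) × Int) : Int :=
  if kp.1.1 == N && kp.1.2.1 == mcap && decide (E < kp.1.2.2) && decide (best < kp.2)
  then kp.2 else best

def dInit : PySem.Dict (Int × Int × Int) Int :=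
  (PySem.Dict.empty : PySem.Dict (Int × Int × Int) Int).insert (0, 0, 0) 0

lemma selA_eq (candidates : List (List Int)) (N E B : Int) :
    select_team candidates N E B = (pvComb N.toNat candidates).foldl (stepA E B) 0 := rfl

lemma selB_eq (candidates : List (List Int)) (N E B : Int) :
    select_team_alt candidates N E B =
      if N ≤ 0 ∨ (candidates.length : Int) < N then 0
      else (candidates.foldl (outerF N (mcapOf B)) dInit).items.foldl (readoutF N (mcapOf B) E) 0 := rfl


-- generic "running maximum" fold lemmas
lemma pvFoldGe {α : Type} (f : Int → α → Int) (hf : ∀ a x, a ≤ f a x) :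
    ∀ (L : List α) (a : Int), a ≤ L.foldl f a := by
  intro L
  induction L with
  | nil => intro a; exact le_refl a
  | cons x L ih => intro a; exact le_trans (hf a x) (ih (f a x))

lemma pvFoldMem {α : Type} (f : Int → α → Int) (hf : ∀ a x, a ≤ f a x)
    (q : α → Prop) (v : α → Int) (h2 : ∀ a x, q x → v x ≤ f a x) :
    ∀ (L : List α) (a : Int) (x : α), x ∈ L → q x → v x ≤ L.foldl f a := by
  intro L
  induction L with
  | nil => intro a x hx; exact absurd hx (List.not_mem_nil)
  | cons y L ih =>
    intro a x hx hq
    rcases List.mem_cons.mp hx with h | h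
    · subst h; exact le_trans (h2 a x hq) (pvFoldGe f hf L (f a x))
    · exact ih (f a y) x h hq

lemma pvFoldCases {α : Type} (f : Int → α → Int) (q : α → Prop) (v : α → Int)
    (h : ∀ a x, f a x = a ∨ (q x ∧ f a x = v x)) :
    ∀ (L : List α) (a : Int), L.foldl f a = a ∨ ∃ x, x ∈ L ∧ q x ∧ L.foldl f a = v x := by
  intro L
  induction L with
  | nil => intro a; exact Or.inl rfl
  | cons y L ih =>
    intro a
    rcases ih (f a y) with h0 | ⟨x, hx, hq, he⟩
    · rcases h a y with h1 | ⟨hq, h1⟩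
      · exact Or.inl (by simpa [h1] using h0)
      · exact Or.inr ⟨y, List.mem_cons_self, hq, by simpa [h1] using h0⟩
    · exact Or.inr ⟨x, List.mem_cons_of_mem y hx, hq, he⟩

-- the inner triple fold of A computes (sE, sM, sP)
lemma tripleFold (t : List (List Int)) :
    ∀ a b c : Int,
      t.foldl (fun (acc : Int × Int × Int) c =>
        (acc.1 + (PySem.List.pyGet? c 1).getD 0,
         acc.2.1 + (if ((PySem.List.pyGet? c 2).getD 0) == 1 then 1 else 0),
         acc.2.2 + (PySem.List.pyGet? c 0).getD 0)) (a, b, c) =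
      (a + sE t, b + sM t, c + sP t) := by
  induction t with
  | nil => intro a b c; simp [sE, sM, sP]
  | cons x t ih =>
    intro a b c
    simp only [List.foldl_cons, ih, sE, sM, sP, List.map_cons, List.sum_cons, rowE, rowG, rowP]
    refine Prod.ext (by ring) (Prod.ext (by ring_nf) (by ring))

lemma stepA_eq (E B a : Int) (t : List (List Int)) :
    stepA E B a t =
      if sE t ≤ E then a else if sM t ≤ B then a else if sP t > a then sP t else a := by
  unfold stepA
  rw [tripleFold t 0 0 0]
  simp

-- membership in pvComb = sublist of given length
lemma mem_pvComb : ∀ (k : Nat) (l : List (List Int)) (t : List (List Int)),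
    t ∈ pvComb k l ↔ t.Sublist l ∧ t.length = k := by
  intro k l
  induction l generalizing k with
  | nil =>
    intro t
    cases k with
    | zero =>
      simp only [pvComb, List.mem_singleton]
      constructor
      · rintro rfl; exact ⟨List.nil_sublist _, rfl⟩
      · rintro ⟨hs, hl⟩; exact List.eq_nil_of_length_eq_zero hl
    | succ k =>
      simp only [pvComb, List.not_mem_nil, false_iff]
      rintro ⟨hs, hl⟩
      have := List.sublist_nil.mp hs
      subst this; simp at hl
  | cons x xs ih =>
    intro t
    cases k with
    | zero =>
      simp only [pvComb, List.mem_singleton]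
      constructor
      · rintro rfl; exact ⟨List.nil_sublist _, rfl⟩
      · rintro ⟨hs, hl⟩; exact List.eq_nil_of_length_eq_zero hl
    | succ k =>
      simp only [pvComb, List.mem_append, List.mem_map]
      constructor
      · rintro (⟨t', ht', rfl⟩ | h)
        · rcases (ih k t').mp ht' with ⟨hs, hl⟩
          exact ⟨List.Sublist.cons₂ x hs, by simp [hl]⟩
        · rcases (ih (k+1) t).mp h with ⟨hs, hl⟩
          exact ⟨List.Sublist.cons x hs, hl⟩
      · rintro ⟨hs, hl⟩
        rcases List.sublist_cons_iff.mp hs with h | ⟨r, rfl, hr⟩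
        · exact Or.inr ((ih (k+1) t).mpr ⟨h, hl⟩)
        · exact Or.inl ⟨r, (ih k r).mpr ⟨hr, by simpa using hl⟩, rfl⟩

lemma pvComb_nil (k : Nat) (l : List (List Int)) (h : l.length < k) : pvComb k l = [] := by
  cases h' : pvComb k l with
  | nil => rfl
  | cons t ts =>
    exfalso
    have ht : t ∈ pvComb k l := by rw [h']; exact List.mem_cons_self
    rcases (mem_pvComb k l t).mp ht with ⟨hs, hl⟩
    have := hs.length_le
    omega

-- stats of a snoc is a bump
lemma statsK_append (mcap : Int) (S : List (List Int)) (c : List Int) :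
    statsK mcap (S ++ [c]) = bumpK mcap (rowE c) (rowG c) (statsK mcap S) := by
  unfold statsK bumpK
  have h1 : sE (S ++ [c]) = sE S + rowE c := by simp [sE]
  have h2 : sM (S ++ [c]) = sM S + (if rowG c == 1 then (1:Int) else 0) := by simp [sM]
  refine Prod.ext (by simp) (Prod.ext ?_ (by simpa using h1))
  simp only [h2]
  have : (0:Int) ≤ if rowG c == 1 then (1:Int) else 0 := by split <;> omega
  omega

lemma sM_nonneg (S : List (List Int)) : 0 ≤ sM S := by
  unfold sM
  apply List.sum_nonneg
  intro x hx
  simp only [List.mem_map] at hx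
  rcases hx with ⟨c, _, rfl⟩
  split <;> omega

lemma sP_append (S : List (List Int)) (c : List Int) : sP (S ++ [c]) = sP S + rowP c := by
  simp [sP]

-- dict lemmas about the inner loop
lemma innerStepNodup (N mcap p e g : Int) (acc : PySem.Dict (Int × Int × Int) Int)
    (x : (Int × Int × Int) × Int) (h : acc.keys.Nodup) :
    (innerF N mcap p e g acc x).keys.Nodup := by
  unfold innerF
  split
  · exact h
  · cases hg : acc.get? (bumpK mcap e g x.1) with
    | none => exact PySem.Dict.nodup_keys_insert _ _ _ h
    | some v =>
      dsimp only
      by_cases hlt : v < x.2 + p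
      · rw [if_pos hlt]
        exact PySem.Dict.nodup_keys_insert _ _ _ h
      · rw [if_neg hlt]
        exact h

lemma innerNodup (N mcap p e g : Int) :
    ∀ (L : List ((Int × Int × Int) × Int)) (acc : PySem.Dict (Int × Int × Int) Int),
      acc.keys.Nodup → (L.foldl (innerF N mcap p e g) acc).keys.Nodup := by
  intro L
  induction L with
  | nil => intro acc h; exact h
  | cons x L ih => intro acc h; exact ih _ (innerStepNodup N mcap p e g acc x h)

lemma innerStepMono (N mcap p e g : Int) (acc : PySem.Dict (Int × Int × Int) Int)
    (x : (Int × Int × Int) × Int) (k : Int × Int × Int) (v : Int)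
    (h : acc.get? k = some v) :
    ∃ w, (innerF N mcap p e g acc x).get? k = some w ∧ v ≤ w := by
  unfold innerF
  split
  · exact ⟨v, h, le_refl v⟩
  · cases hg : acc.get? (bumpK mcap e g x.1) with
    | none =>
      by_cases hk : k = bumpK mcap e g x.1
      · rw [hk] at h; rw [h] at hg; cases hg
      · rw [PySem.Dict.get?_insert_of_ne _ _ hk]; exact ⟨v, h, le_refl v⟩
    | some v0 =>
      dsimp only
      by_cases hlt : v0 < x.2 + p
      · rw [if_pos hlt]
        by_cases hk : k = bumpK mcap e g x.1
        · subst hk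
          rw [h] at hg
          injection hg with hg'
          rw [PySem.Dict.get?_insert_self]
          exact ⟨x.2 + p, rfl, by omega⟩
        · rw [PySem.Dict.get?_insert_of_ne _ _ hk]; exact ⟨v, h, le_refl v⟩
      · rw [if_neg hlt]
        exact ⟨v, h, le_refl v⟩

lemma innerMono (N mcap p e g : Int) :
    ∀ (L : List ((Int × Int × Int) × Int)) (acc : PySem.Dict (Int × Int × Int) Int)
      (k : Int × Int × Int) (v : Int), acc.get? k = some v →
      ∃ w, (L.foldl (innerF N mcap p e g) acc).get? k = some w ∧ v ≤ w := by
  intro L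
  induction L with
  | nil => intro acc k v h; exact ⟨v, h, le_refl v⟩
  | cons x L ih =>
    intro acc k v h
    rcases innerStepMono N mcap p e g acc x k v h with ⟨w0, hw0, hvw0⟩
    rcases ih (innerF N mcap p e g acc x) k w0 hw0 with ⟨w, hw, hww⟩
    exact ⟨w, hw, le_trans hvw0 hww⟩

lemma innerReach (N mcap p e g : Int) :
    ∀ (L : List ((Int × Int × Int) × Int)) (acc : PySem.Dict (Int × Int × Int) Int)
      (k' : Int × Int × Int) (v' : Int), (k', v') ∈ L → ¬(k'.1 = N) →
      ∃ w, (L.foldl (innerF N mcap p e g) acc).get? (bumpK mcap e g k') = some w ∧ v' + p ≤ w := by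
  intro L
  induction L with
  | nil => intro acc k' v' h; exact absurd h (List.not_mem_nil)
  | cons x L ih =>
    intro acc k' v' hmem hne
    rcases List.mem_cons.mp hmem with rfl | h
    · have hstep : ∃ w0, (innerF N mcap p e g acc (k', v')).get? (bumpK mcap e g k') = some w0 ∧
          v' + p ≤ w0 := by
        unfold innerF
        have hb : ((k', v').1.1 == N) = false := by simpa using hne
        rw [hb]
        simp only [Bool.false_eq_true, if_false]
        cases hg : acc.get? (bumpK mcap e g (k', v').1) with
        | none => exact ⟨v' + p, PySem.Dict.get?_insert_self acc _ (v' + p), le_refl _⟩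
        | some v0 =>
          dsimp only
          by_cases hlt : v0 < v' + p
          · rw [if_pos hlt]
            exact ⟨v' + p, PySem.Dict.get?_insert_self acc _ (v' + p), le_refl _⟩
          · rw [if_neg hlt]
            exact ⟨v0, hg, by omega⟩
      rcases hstep with ⟨w0, hw0, hvw0⟩
      rcases innerMono N mcap p e g L _ _ w0 hw0 with ⟨w, hw, hww⟩
      exact ⟨w, hw, le_trans hvw0 hww⟩
    · exact ih _ k' v' h hne

lemma innerStepSound (N mcap p e g : Int) (st acc : PySem.Dict (Int × Int × Int) Int)
    (x : (Int × Int × Int) × Int)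
    (hacc : ∀ kp ∈ acc.items, kp ∈ st.items ∨
        ∃ k' v', (k', v') ∈ st.items ∧ ¬(k'.1 = N) ∧ kp.1 = bumpK mcap e g k' ∧ kp.2 = v' + p)
    (hx : x ∈ st.items) :
    ∀ kp ∈ (innerF N mcap p e g acc x).items, kp ∈ st.items ∨
        ∃ k' v', (k', v') ∈ st.items ∧ ¬(k'.1 = N) ∧ kp.1 = bumpK mcap e g k' ∧ kp.2 = v' + p := by
  intro kp hkp
  unfold innerF at hkp
  by_cases hN : (x.1.1 == N) = true
  · rw [if_pos hN] at hkp; exact hacc kp hkp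
  · rw [if_neg hN] at hkp
    have hne : ¬(x.1.1 = N) := by simpa using hN
    cases hg : acc.get? (bumpK mcap e g x.1) with
    | none =>
      rw [hg] at hkp
      dsimp only at hkp
      rcases (PySem.Dict.mem_items_insert _ _ _ _).mp hkp with rfl | ⟨hold, _⟩
      · exact Or.inr ⟨x.1, x.2, by simpa using hx, hne, rfl, rfl⟩
      · exact hacc kp hold
    | some v0 =>
      rw [hg] at hkp
      dsimp only at hkp
      by_cases hlt : v0 < x.2 + p
      · rw [if_pos hlt] at hkp
        rcases (PySem.Dict.mem_items_insert _ _ _ _).mp hkp with rfl | ⟨hold, _⟩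
        · exact Or.inr ⟨x.1, x.2, by simpa using hx, hne, rfl, rfl⟩
        · exact hacc kp hold
      · rw [if_neg hlt] at hkp
        exact hacc kp hkp

lemma innerSound (N mcap p e g : Int) (st : PySem.Dict (Int × Int × Int) Int) :
    ∀ (L : List ((Int × Int × Int) × Int)) (acc : PySem.Dict (Int × Int × Int) Int),
      (∀ kp ∈ acc.items, kp ∈ st.items ∨
        ∃ k' v', (k', v') ∈ st.items ∧ ¬(k'.1 = N) ∧ kp.1 = bumpK mcap e g k' ∧ kp.2 = v' + p) →
      (∀ kp ∈ L, kp ∈ st.items) →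
      ∀ kp ∈ (L.foldl (innerF N mcap p e g) acc).items, kp ∈ st.items ∨
        ∃ k' v', (k', v') ∈ st.items ∧ ¬(k'.1 = N) ∧ kp.1 = bumpK mcap e g k' ∧ kp.2 = v' + p := by
  intro L
  induction L with
  | nil => intro acc hacc _; exact hacc
  | cons x L ih =>
    intro acc hacc hL
    exact ih _ (innerStepSound N mcap p e g st acc x hacc (hL x List.mem_cons_self))
      (fun kp h => hL kp (List.mem_cons_of_mem x h))

-- DP invariant
def SoundI (mcap : Int) (st : PySem.Dict (Int × Int × Int) Int) (P : List (List Int)) : Prop :=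
  ∀ kp ∈ st.items, ∃ S : List (List Int), S.Sublist P ∧ statsK mcap S = kp.1 ∧ sP S = kp.2

def CompleteI (N mcap : Int) (st : PySem.Dict (Int × Int × Int) Int) (P : List (List Int)) : Prop :=
  ∀ S : List (List Int), S.Sublist P → (S.length : Int) ≤ N →
    ∃ v, st.get? (statsK mcap S) = some v ∧ sP S ≤ v

lemma dpStep (N mcap : Int) (st : PySem.Dict (Int × Int × Int) Int) (P : List (List Int))
    (c : List Int) (hnd : st.keys.Nodup) (hs : SoundI mcap st P) (hc : CompleteI N mcap st P) :
    (outerF N mcap st c).keys.Nodup ∧ SoundI mcap (outerF N mcap st c) (P ++ [c]) ∧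
      CompleteI N mcap (outerF N mcap st c) (P ++ [c]) := by
  refine ⟨innerNodup _ _ _ _ _ _ st hnd, ?_, ?_⟩
  · intro kp hkp
    have hq := innerSound N mcap (rowP c) (rowE c) (rowG c) st st.items st
      (fun kp h => Or.inl h) (fun kp h => h) kp hkp
    rcases hq with h | ⟨k', v', hmem, hne, hk, hv⟩
    · rcases hs kp h with ⟨S, hS, hst, hsp⟩
      exact ⟨S, hS.trans (List.sublist_append_left P [c]), hst, hsp⟩
    · rcases hs (k', v') hmem with ⟨S, hS, hst, hsp⟩
      refine ⟨S ++ [c], List.Sublist.append hS (List.Sublist.refl [c]), ?_, ?_⟩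
      · rw [statsK_append, hst, hk]
      · rw [sP_append, hsp, hv]
  · intro S hS hlen
    rcases List.sublist_append_iff.mp hS with ⟨S1, S2, rfl, h1, h2⟩
    rcases List.sublist_singleton.mp h2 with rfl | rfl
    · rw [List.append_nil] at hlen ⊢
      rcases hc S1 h1 hlen with ⟨v, hv, hle⟩
      rcases innerMono N mcap (rowP c) (rowE c) (rowG c) st.items st _ _ hv with ⟨w, hw, hvw⟩
      exact ⟨w, hw, le_trans hle hvw⟩
    · have hlen1 : (S1.length : Int) ≤ N - 1 := by
        simp only [List.length_append, List.length_singleton] at hlen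
        push_cast at hlen ⊢
        omega
      rcases hc S1 h1 (by omega) with ⟨v1, hv1, hle1⟩
      have hmem1 : (statsK mcap S1, v1) ∈ st.items :=
        PySem.Dict.mem_items_of_get?_eq_some st hv1
      have hne1 : ¬((statsK mcap S1).1 = N) := by
        simp only [statsK]
        omega
      rcases innerReach N mcap (rowP c) (rowE c) (rowG c) st.items st _ _ hmem1 hne1 with
        ⟨w, hw, hle2⟩
      refine ⟨w, ?_, ?_⟩
      · rw [statsK_append]; exact hw
      · rw [sP_append]; omega

lemma dpInv (N mcap : Int) :
    ∀ (rest : List (List Int)) (st : PySem.Dict (Int × Int × Int) Int) (P : List (List Int)),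
      st.keys.Nodup → SoundI mcap st P → CompleteI N mcap st P →
      (rest.foldl (outerF N mcap) st).keys.Nodup ∧
      SoundI mcap (rest.foldl (outerF N mcap) st) (P ++ rest) ∧
      CompleteI N mcap (rest.foldl (outerF N mcap) st) (P ++ rest) := by
  intro rest
  induction rest with
  | nil =>
    intro st P hnd hs hc
    rw [List.append_nil]
    exact ⟨hnd, hs, hc⟩
  | cons c rest ih =>
    intro st P hnd hs hc
    rcases dpStep N mcap st P c hnd hs hc with ⟨hnd', hs', hc'⟩
    have := ih (outerF N mcap st c) (P ++ [c]) hnd' hs' hc'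
    simpa [List.append_assoc] using this

lemma mcapOf_nonneg (B : Int) : 0 ≤ mcapOf B := by
  unfold mcapOf; split <;> omega

lemma statsK_nil (mcap : Int) (hm : 0 ≤ mcap) : statsK mcap [] = (0, 0, 0) := by
  unfold statsK sM sE
  simp [min_eq_left hm]

-- readout step lemmas
lemma readout_ge (N mcap E : Int) (a : Int) (kp : (Int × Int × Int) × Int) :
    a ≤ readoutF N mcap E a kp := by
  unfold readoutF
  split
  · rename_i h
    simp only [Bool.and_eq_true, decide_eq_true_eq] at h
    omega
  · exact le_refl a

lemma readout_mem (N mcap E : Int) (a : Int) (kp : (Int × Int × Int) × Int)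
    (hq : kp.1.1 = N ∧ kp.1.2.1 = mcap ∧ E < kp.1.2.2) :
    kp.2 ≤ readoutF N mcap E a kp := by
  unfold readoutF
  split
  · exact le_refl _
  · rename_i h
    simp only [Bool.and_eq_true, decide_eq_true_eq, beq_iff_eq] at h
    rcases hq with ⟨h1, h2, h3⟩
    by_cases h4 : a < kp.2
    · exact absurd ⟨⟨⟨h1, h2⟩, h3⟩, h4⟩ h
    · omega

lemma readout_cases (N mcap E : Int) (a : Int) (kp : (Int × Int × Int) × Int) :
    readoutF N mcap E a kp = a ∨
      ((kp.1.1 = N ∧ kp.1.2.1 = mcap ∧ E < kp.1.2.2) ∧ readoutF N mcap E a kp = kp.2) := by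
  unfold readoutF
  split
  · rename_i h
    simp only [Bool.and_eq_true, decide_eq_true_eq, beq_iff_eq] at h
    exact Or.inr ⟨⟨h.1.1.1, h.1.1.2, h.1.2⟩, rfl⟩
  · exact Or.inl rfl

-- A-side step lemmas
lemma stepA_ge (E B a : Int) (t : List (List Int)) : a ≤ stepA E B a t := by
  rw [stepA_eq]; split_ifs <;> omega

lemma stepA_mem (E B a : Int) (t : List (List Int)) (h : E < sE t ∧ B < sM t) :
    sP t ≤ stepA E B a t := by
  rw [stepA_eq]; split_ifs <;> omega

lemma stepA_cases (E B a : Int) (t : List (List Int)) :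
    stepA E B a t = a ∨ ((E < sE t ∧ B < sM t) ∧ stepA E B a t = sP t) := by
  rw [stepA_eq]
  split_ifs with h1 h2 h3
  · exact Or.inl rfl
  · exact Or.inl rfl
  · exact Or.inr ⟨⟨by omega, by omega⟩, rfl⟩
  · exact Or.inl rfl

-- main equality, away from the guard
lemma dp_eq (candidates : List (List Int)) (N E B : Int) (hN : 0 ≤ N) :
    (pvComb N.toNat candidates).foldl (stepA E B) 0 =
      (candidates.foldl (outerF N (mcapOf B)) dInit).items.foldl (readoutF N (mcapOf B) E) 0 := by
  have hm : 0 ≤ mcapOf B := mcapOf_nonneg B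
  -- the DP invariant at the end of the fold
  have hinit_nd : dInit.keys.Nodup :=
    PySem.Dict.nodup_keys_insert _ _ _ PySem.Dict.nodup_keys_empty
  have hinit_s : SoundI (mcapOf B) dInit [] := by
    intro kp hkp
    unfold dInit at hkp
    rcases (PySem.Dict.mem_items_insert _ _ _ _).mp hkp with rfl | ⟨hold, _⟩
    · exact ⟨[], List.Sublist.refl [], statsK_nil _ hm, rfl⟩
    · simp [PySem.Dict.empty] at hold
  have hinit_c : CompleteI N (mcapOf B) dInit [] := by
    intro S hS _
    have : S = [] := List.sublist_nil.mp hS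
    subst this
    refine ⟨0, ?_, le_refl 0⟩
    rw [statsK_nil _ hm]
    exact PySem.Dict.get?_insert_self _ _ _
  rcases dpInv N (mcapOf B) candidates dInit [] hinit_nd hinit_s hinit_c with ⟨hnd, hs, hc⟩
  rw [List.nil_append] at hs hc
  set final := candidates.foldl (outerF N (mcapOf B)) dInit with hfinal
  apply le_antisymm
  · -- A ≤ B
    rcases pvFoldCases (stepA E B) (fun t => E < sE t ∧ B < sM t) sP (stepA_cases E B)
      (pvComb N.toNat candidates) 0 with h0 | ⟨t, ht, hok, he⟩
    · rw [h0]
      exact pvFoldGe _ (readout_ge N (mcapOf B) E) _ 0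
    · rcases (mem_pvComb N.toNat candidates t).mp ht with ⟨hsub, hlen⟩
      have hlenN : (t.length : Int) ≤ N := by
        rw [hlen]
        omega
      rcases hc t hsub hlenN with ⟨v, hv, hle⟩
      have hitem := PySem.Dict.mem_items_of_get?_eq_some final hv
      have hmle : mcapOf B ≤ sM t := by
        have h0 := sM_nonneg t
        unfold mcapOf
        split <;> omega
      have hq : (statsK (mcapOf B) t, v).1.1 = N ∧ (statsK (mcapOf B) t, v).1.2.1 = mcapOf B ∧
          E < (statsK (mcapOf B) t, v).1.2.2 := by
        refine ⟨?_, ?_, ?_⟩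
        · simp only [statsK]; rw [hlen]; omega
        · simp only [statsK]; exact min_eq_right hmle
        · simp only [statsK]; exact hok.1
      have := pvFoldMem (readoutF N (mcapOf B) E) (readout_ge N (mcapOf B) E)
        (fun kp => kp.1.1 = N ∧ kp.1.2.1 = mcapOf B ∧ E < kp.1.2.2) (fun kp => kp.2)
        (readout_mem N (mcapOf B) E) final.items 0 _ hitem hq
      rw [he]
      exact le_trans hle this
  · -- B ≤ A
    rcases pvFoldCases (readoutF N (mcapOf B) E)
      (fun kp => kp.1.1 = N ∧ kp.1.2.1 = mcapOf B ∧ E < kp.1.2.2) (fun kp => kp.2)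
      (readout_cases N (mcapOf B) E) final.items 0 with h0 | ⟨kp, hkp, hq, he⟩
    · rw [h0]
      exact pvFoldGe _ (stepA_ge E B) _ 0
    · rcases hs kp hkp with ⟨S, hsub, hst, hsp⟩
      rcases hq with ⟨hq1, hq2, hq3⟩
      rw [← hst] at hq1 hq2 hq3
      simp only [statsK] at hq1 hq2 hq3
      have hlen : S.length = N.toNat := by omega
      have hokS : E < sE S ∧ B < sM S := by
        refine ⟨hq3, ?_⟩
        have h0 := sM_nonneg S
        have h2 : mcapOf B ≤ sM S := by
          rcases min_cases (sM S) (mcapOf B) with ⟨hmin, _⟩ | ⟨hmin, hle⟩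
          · omega
          · omega
        unfold mcapOf at h2
        split at h2 <;> omega
      have hmemA : S ∈ pvComb N.toNat candidates := (mem_pvComb _ _ S).mpr ⟨hsub, hlen⟩
      have := pvFoldMem (stepA E B) (stepA_ge E B) (fun t => E < sE t ∧ B < sM t) sP
        (stepA_mem E B) (pvComb N.toNat candidates) 0 S hmemA hokS
      rw [he, ← hsp]
      exact this

lemma main_eq (candidates : List (List Int)) (N E B : Int) (hN : 0 ≤ N) :
    select_team candidates N E B = select_team_alt candidates N E B := by
  rw [selA_eq, selB_eq]
  by_cases hg : N ≤ 0 ∨ (candidates.length : Int) < N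
  · rw [if_pos hg]
    rcases hg with hg | hg
    · have h0 : N = 0 := le_antisymm hg hN
      subst h0
      have hc0 : pvComb (Int.toNat 0) candidates = [[]] := by cases candidates <;> rfl
      rw [hc0]
      show stepA E B 0 [] = 0
      rw [stepA_eq]
      have h1 : sE [] = 0 := rfl
      have h2 : sM [] = 0 := rfl
      have h3 : sP [] = 0 := rfl
      rw [h1, h2, h3]
      split_ifs <;> omega
    · rw [pvComb_nil N.toNat candidates (by omega)]
      rfl
  · rw [if_neg hg]
    exact dp_eq candidates N E B hN

-- ===== VERDICT (by name: the statement is the Claim_ definition above) =====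
theorem select_team_spec : Claim_equal_select_team := by
  intro candidates N E B _ hPre
  unfold Spec_select_team
  exact main_eq candidates N E B hPre.1
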